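-- pv_equiv track=rewrite | github.com/gama843/bachelor-thesis | code/data_generator.py | _get_count_of_objects_with_shape
-- ===== SOURCE A (Python) =====
-- def _get_count_of_objects_with_shape(color, objects_info):
--     """
--     @public
--
--     Count the number of objects with the same shape as the object of the specified color.
--
--     Parameters:
--     -----------
--     color : str
--         The color of the reference object to find the shape of.
--     objects_info : list
--         A list of dictionaries, where each dictionary contains information about an object
--         in the image, including its color and shape.
--
--     Returns:
--     --------
--     int
--         The count of objects that have the same shape as the object of the specified color.
--     """
--     # find the shape of the object in question
--     shape = None
--     for obj_info in objects_info:
--         # skip the question object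
--         if 'question' in obj_info:
--             continue
--         if obj_info["color_name"] == color:
--             shape = obj_info["object_type"]
--             break
--     # count the number of objects with the same shape
--     count = 0
--     for obj_info in objects_info:
--         # skip the question object
--         if 'question' in obj_info:
--             continue
--         if obj_info["object_type"] == shape:
--             count += 1
--     return count
-- ===== SOURCE B (Python) =====
-- def _get_count_of_objects_with_shape(color, objects_info):
--     # Single pass: build a shape-frequency table while spotting the first
--     # non-question object of the reference color; finish with one table lookup.
--     counts = {}
--     shape = None
--     found = False
--     for obj_info in objects_info:
--         if 'question' in obj_info:
--             continue
--         t = obj_info["object_type"]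
--         counts[t] = counts.get(t, 0) + 1
--         if not found and obj_info["color_name"] == color:
--             shape = t
--             found = True
--     return counts.get(shape, 0)
-- ===== Notes on version B (the rewrite author's own statement) =====
-- stated objective: alternative
-- what changed: Replaces A's two scans (find the reference shape, then re-scan counting objects of that shape) with one scan that builds a shape-frequency dict while spotting the first reference-color object via a found flag, finishing with a single dict lookup.
import Mathlib
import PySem

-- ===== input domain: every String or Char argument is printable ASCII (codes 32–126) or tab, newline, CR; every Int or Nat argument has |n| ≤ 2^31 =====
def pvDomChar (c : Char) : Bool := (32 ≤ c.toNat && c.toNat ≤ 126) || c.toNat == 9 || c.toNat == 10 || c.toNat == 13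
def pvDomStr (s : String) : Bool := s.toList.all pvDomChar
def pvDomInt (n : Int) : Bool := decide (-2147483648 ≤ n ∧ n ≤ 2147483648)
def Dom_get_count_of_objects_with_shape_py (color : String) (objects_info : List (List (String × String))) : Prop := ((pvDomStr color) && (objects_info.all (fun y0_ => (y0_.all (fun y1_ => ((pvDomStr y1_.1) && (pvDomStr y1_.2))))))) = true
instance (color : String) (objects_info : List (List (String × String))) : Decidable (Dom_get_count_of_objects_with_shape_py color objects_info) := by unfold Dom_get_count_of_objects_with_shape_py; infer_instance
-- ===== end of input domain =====

-- B fuses A's two scans into one pass that builds a shape-frequency table plus a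
-- found-flag first-match; same cost, different decomposition (no speed claim).

-- ===== PORT A =====
-- dict helpers (assoc list, first match = Python dict lookup on well-formed dicts)
def pvHasKey (o : List (String × String)) (k : String) : Bool := o.any (fun p => p.1 == k)
def pvGetK? (o : List (String × String)) (k : String) : Option String := (o.find? (fun p => p.1 == k)).map (·.2)

-- A's first loop: find the shape of the first non-question object with the reference color
def pvFindShapeA (color : String) : List (List (String × String)) → Option String
  | [] => none
  | o :: rest =>
    if pvHasKey o "question" then pvFindShapeA color rest
    else if pvGetK? o "color_name" == some color then pvGetK? o "object_type"
    else pvFindShapeA color rest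

def get_count_of_objects_with_shape_py (color : String) (objects_info : List (List (String × String))) : Int :=
  let shape := pvFindShapeA color objects_info
  objects_info.foldl
    (fun count o =>
      if pvHasKey o "question" then count
      else if pvGetK? o "object_type" == shape then count + 1
      else count) 0

-- ===== PORT B =====
-- state: (counts dict, shape, found flag); one pass over objects_info
def pvStepB (color : String) (st : PySem.Dict String Int × Option String × Bool)
    (o : List (String × String)) : PySem.Dict String Int × Option String × Bool :=
  if pvHasKey o "question" then st
  else
    let t := (pvGetK? o "object_type").getD ""
    let counts := st.1.insert t (st.1.getD t 0 + 1)
    if !st.2.2 && (pvGetK? o "color_name" == some color) then (counts, some t, true)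
    else (counts, st.2.1, st.2.2)

def get_count_of_objects_with_shape_py_alt (color : String) (objects_info : List (List (String × String))) : Int :=
  let st := objects_info.foldl (pvStepB color) (PySem.Dict.empty, none, false)
  match st.2.1 with
  | none => 0            -- counts.get(None, 0): no string key equals None
  | some s => st.1.getD s 0

-- ===== PRECONDITION & SPEC =====
-- Pre_ excludes exactly the inputs where the Python A raises KeyError: a non-question
-- object without "object_type", or a non-question object without "color_name" occurring
-- before the first non-question object whose color_name equals color.
def Pre_get_count_of_objects_with_shape_py (color : String) (objects_info : List (List (String × String))) : Prop :=
  (∀ o ∈ objects_info, pvHasKey o "question" = false → pvHasKey o "object_type" = true) ∧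
  (∀ o ∈ objects_info.takeWhile
          (fun o => pvHasKey o "question" || !(pvGetK? o "color_name" == some color)),
      pvHasKey o "question" = false → pvHasKey o "color_name" = true)

instance (color : String) (objects_info : List (List (String × String))) : Decidable (Pre_get_count_of_objects_with_shape_py color objects_info) := by unfold Pre_get_count_of_objects_with_shape_py; infer_instance

def pvWitness_get_count_of_objects_with_shape_py : String × (List (List (String × String))) :=
  ("red", [[("color_name", "red"), ("object_type", "circle")], [("color_name", "blue"), ("object_type", "circle")]])

def Spec_get_count_of_objects_with_shape_py (color : String) (objects_info : List (List (String × String))) (out : Int) : Prop := out = get_count_of_objects_with_shape_py_alt color objects_info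
instance (color : String) (objects_info : List (List (String × String))) (out : Int) : Decidable (Spec_get_count_of_objects_with_shape_py color objects_info out) := by unfold Spec_get_count_of_objects_with_shape_py; infer_instance

-- ===== CLAIM (what is proved, stated in full; the proofs are below) =====
def Claim_equal_get_count_of_objects_with_shape_py : Prop := ∀ (color : String) (objects_info : List (List (String × String))), Dom_get_count_of_objects_with_shape_py color objects_info → Pre_get_count_of_objects_with_shape_py color objects_info → Spec_get_count_of_objects_with_shape_py color objects_info (get_count_of_objects_with_shape_py color objects_info)

-- ===== LEMMAS AND PROOFS =====

def pvTval (o : List (String × String)) : String := (pvGetK? o "object_type").getD ""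
def pvMatchP (color : String) (o : List (String × String)) : Bool :=
  !pvHasKey o "question" && (pvGetK? o "color_name" == some color)

lemma pvHasKey_get (o : List (String × String)) (k : String)
    (h : pvHasKey o k = true) : ∃ v, pvGetK? o k = some v := by
  induction o with
  | nil => simp [pvHasKey] at h
  | cons p rest ih =>
    by_cases hp : p.1 == k
    · exact ⟨p.2, by simp [pvGetK?, hp]⟩
    · simp only [pvHasKey, List.any_cons, hp, Bool.false_or] at h
      obtain ⟨v, hv⟩ := ih h
      exact ⟨v, by simpa [pvGetK?, hp] using hv⟩

lemma pvFindShapeA_eq_find (color : String) (l : List (List (String × String))) :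
    pvFindShapeA color l = (l.find? (pvMatchP color)).bind (fun o => pvGetK? o "object_type") := by
  induction l with
  | nil => rfl
  | cons o rest ih =>
    by_cases hq : pvHasKey o "question"
    · simp [pvFindShapeA, hq, pvMatchP, ih]
    · by_cases hc : pvGetK? o "color_name" == some color
      · simp [pvFindShapeA, hq, hc, pvMatchP]
      · simp [pvFindShapeA, hq, hc, pvMatchP, ih]

-- the fold of B splits into an independent counts fold and a shape fold
def pvCFold (l : List (List (String × String))) (d : PySem.Dict String Int) : PySem.Dict String Int :=
  l.foldl (fun d o => if pvHasKey o "question" then d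
                      else d.insert (pvTval o) (d.getD (pvTval o) 0 + 1)) d

def pvSFold (color : String) (l : List (List (String × String))) (p : Option String × Bool) :
    Option String × Bool :=
  l.foldl (fun p o => if pvHasKey o "question" then p
                      else if !p.2 && (pvGetK? o "color_name" == some color) then (some (pvTval o), true)
                      else p) p

lemma pvFoldB_split (color : String) (l : List (List (String × String)))
    (st : PySem.Dict String Int × Option String × Bool) :
    l.foldl (pvStepB color) st = (pvCFold l st.1, pvSFold color l st.2) := by
  induction l generalizing st with
  | nil => rfl
  | cons o rest ih =>
    simp only [List.foldl_cons, ih, pvStepB, pvCFold, pvSFold, pvTval]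
    by_cases hq : pvHasKey o "question"
    · simp [hq]
    · by_cases hm : (!st.2.2 && (pvGetK? o "color_name" == some color)) = true
      · simp [hq, hm]
      · simp [hq, hm]

lemma pvSFold_found (color : String) (l : List (List (String × String))) (s : Option String) :
    pvSFold color l (s, true) = (s, true) := by
  induction l with
  | nil => rfl
  | cons o rest ih => simp [pvSFold, List.foldl_cons] at ih ⊢; exact ih

lemma pvSFold_none (color : String) (l : List (List (String × String))) :
    pvSFold color l (none, false) =
      match l.find? (pvMatchP color) with
      | none => (none, false)
      | some o => (some (pvTval o), true) := by
  induction l with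
  | nil => rfl
  | cons o rest ih =>
    by_cases hq : pvHasKey o "question"
    · simp [pvSFold, List.foldl_cons, hq, pvMatchP] at ih ⊢; exact ih
    · by_cases hc : pvGetK? o "color_name" = some color
      · have := pvSFold_found color rest (some (pvTval o))
        simp [pvSFold, List.foldl_cons, hq, hc, pvMatchP] at this ⊢
        exact this
      · simp [pvSFold, List.foldl_cons, hq, hc, pvMatchP] at ih ⊢; exact ih

lemma pvCFold_getD (l : List (List (String × String))) (d : PySem.Dict String Int) (s : String) :
    (pvCFold l d).getD s 0 =
      d.getD s 0 + (l.countP (fun o => !pvHasKey o "question" && pvTval o == s) : Int) := by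
  induction l generalizing d with
  | nil => simp [pvCFold]
  | cons o rest ih =>
    by_cases hq : pvHasKey o "question"
    · simp [pvCFold, List.foldl_cons, hq] at ih ⊢; exact ih d
    · by_cases hs : pvTval o = s
      · simp only [pvCFold, List.foldl_cons] at ih ⊢
        rw [if_neg hq, ih, PySem.Dict.getD_insert]
        simp [hs, hq]
        ring
      · simp only [pvCFold, List.foldl_cons] at ih ⊢
        rw [if_neg hq, ih, PySem.Dict.getD_insert]
        simp [hq, hs]
        exact fun h => absurd h.symm hs

lemma pvCountA (l : List (List (String × String))) (shape : Option String) :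
    l.foldl
      (fun count o =>
        if pvHasKey o "question" then count
        else if pvGetK? o "object_type" == shape then count + 1
        else count) (0 : Int)
    = (l.countP (fun o => !pvHasKey o "question" && pvGetK? o "object_type" == shape) : Int) := by
  have hstep : (fun (count : Int) o =>
      if pvHasKey o "question" then count
      else if pvGetK? o "object_type" == shape then count + 1
      else count)
    = (fun (count : Int) o =>
        if (!pvHasKey o "question" && pvGetK? o "object_type" == shape) = true then count + 1
        else count) := by
    funext c o
    by_cases hq : pvHasKey o "question" <;> by_cases hc : pvGetK? o "object_type" == shape <;>
      simp [hq, hc]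
  rw [hstep, PySem.List.foldl_count_if]
  simp

-- ===== VERDICT (by name: the statement is the Claim_ definition above) =====
theorem get_count_of_objects_with_shape_py_spec : Claim_equal_get_count_of_objects_with_shape_py := by
  intro color l _hdom hpre
  obtain ⟨h1, _h2⟩ := hpre
  unfold Spec_get_count_of_objects_with_shape_py
  simp only [get_count_of_objects_with_shape_py, get_count_of_objects_with_shape_py_alt,
    pvFoldB_split, pvSFold_none, pvFindShapeA_eq_find]
  rw [pvCountA]
  cases hf : l.find? (pvMatchP color) with
  | none =>
    simp only [Option.bind_none]
    simp
    intro o ho hq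
    obtain ⟨v, hv⟩ := pvHasKey_get o "object_type" (h1 o ho hq)
    simp [hv]
  | some o =>
    have hom : o ∈ l := List.mem_of_find?_eq_some hf
    have hP : pvMatchP color o = true := List.find?_some hf
    have hoq : pvHasKey o "question" = false := by
      simp [pvMatchP] at hP; simpa using hP.1
    obtain ⟨v, hv⟩ := pvHasKey_get o "object_type" (h1 o hom hoq)
    have htv : pvTval o = v := by simp [pvTval, hv]
    simp only [Option.bind_some, hv]
    rw [pvCFold_getD, htv]
    have hcong : ∀ x ∈ l, (!pvHasKey x "question" && pvGetK? x "object_type" == some v)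
        = (!pvHasKey x "question" && pvTval x == v) := by
      intro x hx
      by_cases hq : pvHasKey x "question"
      · simp [hq]
      · obtain ⟨w, hw⟩ := pvHasKey_get x "object_type" (h1 x hx (by simpa using hq))
        simp [hq, hw, pvTval]
    rw [List.countP_congr (fun x hx => by rw [hcong x hx])]
    simp
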